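-- pv_equiv track=rewrite | github.com/sumit4singh/NetworkSecurity | a5/rsa/rsaalgo/main.py | find_relative_prime
-- ===== SOURCE A (Python) =====
-- def find_relative_prime(n, x):
--     x_factors = find_factor(x)
--     for i in range(2, n):
--         i_factor = find_factor(i)
--         seta = set(x_factors)
--         setb = set(i_factor)
--         if seta & setb:
--             continue
--         else:
--             return i
--     return None
--
-- def find_factor(num):
--     factorlist = []
--     for i in range(2, num+1):
--         if num % i == 0:
--             factorlist.append(i)
--     return factorlist
-- ===== SOURCE B (Python) =====
-- def find_relative_prime(n, x):
--     # Factor x once by trial division (empty prime table when x <= 1),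
--     # then return the first i in [2, n) divisible by none of x's primes.
--     primes = []
--     y = x
--     d = 2
--     while d * d <= y:
--         if y % d == 0:
--             primes.append(d)
--             while y % d == 0:
--                 y //= d
--         d += 1
--     if y > 1:
--         primes.append(y)
--     for i in range(2, n):
--         if not any(i % p == 0 for p in primes):
--             return i
--     return None
-- ===== Notes on version B (the rewrite author's own statement) =====
-- stated objective: faster
-- what changed: B factors x once into its set of prime factors by trial division up to sqrt and then tests each candidate i only for divisibility by those primes, instead of rebuilding the full divisor list of every i and intersecting two sets per iteration.
import Mathlib
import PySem

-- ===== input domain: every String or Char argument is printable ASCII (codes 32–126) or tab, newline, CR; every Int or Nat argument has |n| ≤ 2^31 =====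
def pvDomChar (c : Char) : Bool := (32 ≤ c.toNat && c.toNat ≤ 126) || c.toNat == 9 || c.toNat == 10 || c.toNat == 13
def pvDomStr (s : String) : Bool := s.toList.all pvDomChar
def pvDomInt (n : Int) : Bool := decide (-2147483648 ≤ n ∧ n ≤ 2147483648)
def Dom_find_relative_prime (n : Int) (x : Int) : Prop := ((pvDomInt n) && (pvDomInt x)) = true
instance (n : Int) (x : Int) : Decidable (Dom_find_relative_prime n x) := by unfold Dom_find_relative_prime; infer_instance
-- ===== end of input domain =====

-- B replaces A's per-candidate divisor-list rebuilding and set intersection by one trial-division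
-- factorisation of x followed by plain divisibility tests (objective: faster).

-- ===== PORT A =====
def find_factor (num : Int) : List Int :=
  (PySem.List.pyRange 2 (num + 1) 1).foldl
    (fun factorlist i => if PySem.Int.mod num i = 0 then factorlist ++ [i] else factorlist) []

def frpA_loop (x_factors : List Int) : List Int → Option Int
  | [] => none
  | i :: rest =>
      let i_factor := find_factor i
      let seta := PySem.Set.ofList x_factors
      let setb := PySem.Set.ofList i_factor
      if (PySem.Set.inter seta setb).isEmpty = false then frpA_loop x_factors rest
      else some i

def find_relative_prime (n : Int) (x : Int) : Option Int :=
  frpA_loop (find_factor x) (PySem.List.pyRange 2 n 1)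

-- ===== PORT B =====
-- termination fact for the inner while-loop of B (cited by stripB's decreasing_by)
theorem pv_strip_dec (d y : Int) (h : 2 ≤ d ∧ 0 < y ∧ PySem.Int.mod y d = 0) :
    (PySem.Int.floordiv y d).toNat < y.toNat := by
  obtain ⟨hd, hy, -⟩ := h
  rw [PySem.Int.floordiv_eq_ediv_of_pos (by omega)]
  have h1 : y / d < y := Int.ediv_lt_of_lt_mul (by omega) (by nlinarith)
  have h2 : 0 ≤ y / d := Int.ediv_nonneg (le_of_lt hy) (by omega)
  omega

-- inner 'while y % d == 0: y //= d'; the extra conjuncts '2 ≤ d ∧ 0 < y' only make the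
-- recursion total (they hold at every call site, where 2 ≤ d and d*d ≤ y)
def stripB (d : Int) (y : Int) : Int :=
  if h : 2 ≤ d ∧ 0 < y ∧ PySem.Int.mod y d = 0 then stripB d (PySem.Int.floordiv y d) else y
termination_by y.toNat
decreasing_by exact pv_strip_dec d y h

theorem stripB_pos_le (d y : Int) : 0 < y → 0 < stripB d y ∧ stripB d y ≤ y := by
  induction y using stripB.induct d with
  | case1 y h ih =>
      intro hy
      obtain ⟨hd, -, hmod⟩ := h
      have hdvd : d ∣ y := (PySem.Int.mod_eq_zero_iff_dvd y d).mp hmod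
      have hpos : 0 < PySem.Int.floordiv y d := by
        rw [PySem.Int.floordiv_eq_ediv_of_pos (by omega)]
        exact Int.ediv_pos_of_pos_of_dvd hy (by omega) hdvd
      have hlt : PySem.Int.floordiv y d < y := by
        rw [PySem.Int.floordiv_eq_ediv_of_pos (by omega)]
        exact Int.ediv_lt_of_lt_mul (by omega) (by nlinarith)
      rw [stripB, dif_pos ⟨hd, hy, hmod⟩]
      obtain ⟨h1, h2⟩ := ih hpos
      exact ⟨h1, by omega⟩
  | case2 y h =>
      intro hy
      rw [stripB, dif_neg h]
      exact ⟨hy, le_refl y⟩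

-- outer trial-division loop 'while d*d <= y: …'; the extra conjunct '2 ≤ d' only makes the
-- recursion total (d starts at 2 and only increases)
def facB (y : Int) (d : Int) (primes : List Int) : List Int :=
  if h : 2 ≤ d ∧ d * d ≤ y then
    if PySem.Int.mod y d = 0 then facB (stripB d y) (d + 1) (primes ++ [d])
    else facB y (d + 1) primes
  else if 1 < y then primes ++ [y] else primes
termination_by (y + 1 - d).toNat
decreasing_by
  · have hy : 0 < y := by nlinarith [h.1, h.2]
    have h2d : 2 * d ≤ d * d := by nlinarith [h.1]
    have := stripB_pos_le d y hy
    omega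
  · have h2d : 2 * d ≤ d * d := by nlinarith [h.1]
    have := h.2
    omega

-- 'for i in range(2, n)' with early return, as counter recursion (range is lazy in Python)
def frpB_loop (primes : List Int) (n : Int) (i : Int) : Option Int :=
  if h : i < n then
    if (primes.any fun p => PySem.Int.mod i p = 0) = false then some i
    else frpB_loop primes n (i + 1)
  else none
termination_by (n - i).toNat
decreasing_by omega

def find_relative_prime_alt (n : Int) (x : Int) : Option Int :=
  frpB_loop (facB x 2 []) n 2

-- ===== PRECONDITION & SPEC =====
def Spec_find_relative_prime (n : Int) (x : Int) (out : Option Int) : Prop := out = find_relative_prime_alt n x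
instance (n : Int) (x : Int) (out : Option Int) : Decidable (Spec_find_relative_prime n x out) := by unfold Spec_find_relative_prime; infer_instance

-- ===== CLAIM (what is proved, stated in full; the proofs are below) =====
def Claim_equal_find_relative_prime : Prop := ∀ (n : Int) (x : Int), Dom_find_relative_prime n x → Spec_find_relative_prime n x (find_relative_prime n x)

-- ===== LEMMAS AND PROOFS =====

theorem mem_find_factor (num p : Int) :
    p ∈ find_factor num ↔ 2 ≤ p ∧ p ≤ num ∧ p ∣ num := by
  unfold find_factor
  rw [PySem.List.foldl_append_ite_eq_filter]
  simp only [List.nil_append, List.mem_filter, PySem.List.mem_pyRange_one, decide_eq_true_eq]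
  constructor
  · rintro ⟨⟨h1, h2⟩, h3⟩
    exact ⟨h1, by omega, (PySem.Int.mod_eq_zero_iff_dvd num p).mp h3⟩
  · rintro ⟨h1, h2, h3⟩
    exact ⟨⟨h1, by omega⟩, (PySem.Int.mod_eq_zero_iff_dvd num p).mpr h3⟩

theorem stripB_spec (d y : Int) (hd : 2 ≤ d) :
    0 < y → ¬ d ∣ stripB d y ∧ ∃ k : ℕ, y = d ^ k * stripB d y := by
  induction y using stripB.induct d with
  | case1 y h ih =>
      intro hy
      obtain ⟨-, -, hmod⟩ := h
      have hdvd : d ∣ y := (PySem.Int.mod_eq_zero_iff_dvd y d).mp hmod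
      have hpos : 0 < PySem.Int.floordiv y d := by
        rw [PySem.Int.floordiv_eq_ediv_of_pos (by omega)]
        exact Int.ediv_pos_of_pos_of_dvd hy (by omega) hdvd
      rw [stripB, dif_pos ⟨hd, hy, hmod⟩]
      obtain ⟨h1, k, hk⟩ := ih hpos
      refine ⟨h1, k + 1, ?_⟩
      have heq : d * PySem.Int.floordiv y d = y := by
        rw [PySem.Int.floordiv_eq_ediv_of_pos (by omega)]
        exact Int.mul_ediv_cancel' hdvd
      calc y = d * PySem.Int.floordiv y d := heq.symm
        _ = d ^ (k + 1) * stripB d (PySem.Int.floordiv y d) := by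
              conv_lhs => rw [hk]
              ring
  | case2 y h =>
      intro hy
      have hmod : ¬ PySem.Int.mod y d = 0 := fun hm => h ⟨hd, hy, hm⟩
      rw [stripB, dif_neg h]
      exact ⟨fun hdvd => hmod ((PySem.Int.mod_eq_zero_iff_dvd y d).mpr hdvd), 0, by ring⟩

theorem int_prime_of_no_small (d : Int) (hd : 2 ≤ d)
    (hmin : ∀ e : Int, 2 ≤ e → e < d → ¬ e ∣ d) : Prime d := by
  rw [Int.prime_iff_natAbs_prime]
  rw [Nat.prime_def_lt]
  refine ⟨by omega, fun m hm hdvd => ?_⟩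
  by_contra hne
  have hm0 : m ≠ 0 := by
    rintro rfl
    simp only [Nat.zero_dvd] at hdvd
    omega
  have hm2 : 2 ≤ m := by omega
  have hcast : (m : Int) ∣ d := by
    have : (m : Int) ∣ (d.natAbs : Int) := Int.natCast_dvd_natCast.mpr hdvd
    rwa [Int.natAbs_of_nonneg (by omega)] at this
  exact hmin m (by exact_mod_cast hm2) (by omega) hcast

theorem int_prime_of_no_small_sq (y d : Int) (hy : 1 < y) (hd : 2 ≤ d) (hsq : y < d * d)
    (hmin : ∀ e : Int, 2 ≤ e → e < d → ¬ e ∣ y) : Prime y := by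
  by_contra hnp
  have hnab : ¬ y.natAbs.Prime := fun hp => hnp (Int.prime_iff_natAbs_prime.mpr hp)
  have hab : 2 ≤ y.natAbs := by omega
  set m := y.natAbs.minFac with hm
  have hmp : m.Prime := Nat.minFac_prime (by omega)
  have hmd : (m : Int) ∣ y := by
    have : (m : Int) ∣ (y.natAbs : Int) := Int.natCast_dvd_natCast.mpr (Nat.minFac_dvd _)
    rwa [Int.natAbs_of_nonneg (by omega)] at this
  have hsqle : m * m ≤ y.natAbs := by
    have := Nat.minFac_sq_le_self (by omega) hnab
    simpa [pow_two] using this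
  have hsqle' : (m : Int) * m ≤ y := by
    have : ((m * m : ℕ) : Int) ≤ (y.natAbs : Int) := by exact_mod_cast hsqle
    rwa [Int.natAbs_of_nonneg (by omega), Nat.cast_mul] at this
  have hm2 : (2 : Int) ≤ m := by exact_mod_cast hmp.two_le
  have hmlt : (m : Int) < d := by nlinarith
  exact hmin m hm2 hmlt hmd

theorem prime_dvd_prime_int {p q : Int} (hp2 : 2 ≤ p) (hq2 : 2 ≤ q)
    (hq : Prime q) (hdvd : p ∣ q) : p = q := by
  have h1 : p.natAbs ∣ q.natAbs := Int.natAbs_dvd_natAbs.mpr hdvd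
  have h2 : q.natAbs.Prime := Int.prime_iff_natAbs_prime.mp hq
  rcases (Nat.Prime.eq_one_or_self_of_dvd h2 _ h1) with h | h
  · omega
  · omega

theorem facB_char (y d : Int) (primes : List Int) :
    2 ≤ d → 0 < y → (∀ e : Int, 2 ≤ e → e < d → ¬ e ∣ y) →
    ∀ p : Int, (p ∈ facB y d primes ↔ p ∈ primes ∨ (2 ≤ p ∧ Prime p ∧ p ∣ y)) := by
  induction y, d, primes using facB.induct with
  | case1 y d primes h hmod ih =>
      intro hd hy hsmall p
      have hdvd : d ∣ y := (PySem.Int.mod_eq_zero_iff_dvd y d).mp hmod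
      have hsq : d * d ≤ y := h.2
      have hdp : Prime d := by
        apply int_prime_of_no_small d hd
        exact fun e he1 he2 hed => hsmall e he1 he2 (hed.trans hdvd)
      obtain ⟨hnd, k, hk⟩ := stripB_spec d y hd hy
      have hspos : 0 < stripB d y := (stripB_pos_le d y hy).1
      have hsdvd : stripB d y ∣ y := by
        refine ⟨d ^ k, ?_⟩
        conv_lhs => rw [hk]
        ring
      have hsmall' : ∀ e : Int, 2 ≤ e → e < d + 1 → ¬ e ∣ stripB d y := by
        intro e he1 he2 hed
        rcases lt_or_eq_of_le (by omega : e ≤ d) with hlt | rfl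
        · exact hsmall e he1 hlt (hed.trans hsdvd)
        · exact hnd hed
      rw [facB, dif_pos h, if_pos hmod, ih (by omega) hspos hsmall' p]
      simp only [List.mem_append, List.mem_singleton]
      constructor
      · rintro ((hp | rfl) | ⟨h1, h2, h3⟩)
        · exact Or.inl hp
        · exact Or.inr ⟨hd, hdp, hdvd⟩
        · exact Or.inr ⟨h1, h2, h3.trans hsdvd⟩
      · rintro (hp | ⟨h1, h2, h3⟩)
        · exact Or.inl (Or.inl hp)
        · rw [hk] at h3
          rcases (Prime.dvd_mul h2).mp h3 with h4 | h4
          · have : p ∣ d := h2.dvd_of_dvd_pow h4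
            exact Or.inl (Or.inr (prime_dvd_prime_int h1 hd hdp this))
          · exact Or.inr ⟨h1, h2, h4⟩
  | case2 y d primes h hmod ih =>
      intro hd hy hsmall p
      have hnd : ¬ d ∣ y := fun hdvd => hmod ((PySem.Int.mod_eq_zero_iff_dvd y d).mpr hdvd)
      have hsmall' : ∀ e : Int, 2 ≤ e → e < d + 1 → ¬ e ∣ y := by
        intro e he1 he2 hed
        rcases lt_or_eq_of_le (by omega : e ≤ d) with hlt | rfl
        · exact hsmall e he1 hlt hed
        · exact hnd hed
      rw [facB, dif_pos h, if_neg hmod]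
      exact ih (by omega) hy hsmall' p
  | case3 y d primes h h1 =>
      intro hd hy hsmall p
      have hsq : y < d * d := by
        by_contra hc
        exact h ⟨hd, by omega⟩
      have hyp : Prime y := int_prime_of_no_small_sq y d h1 hd hsq hsmall
      rw [facB, dif_neg h, if_pos h1]
      simp only [List.mem_append, List.mem_singleton]
      constructor
      · rintro (hp | rfl)
        · exact Or.inl hp
        · exact Or.inr ⟨by omega, hyp, dvd_refl _⟩
      · rintro (hp | ⟨ha, hb, hc⟩)
        · exact Or.inl hp
        · exact Or.inr (prime_dvd_prime_int ha (by omega) hyp hc)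
  | case4 y d primes h h1 =>
      intro hd hy hsmall p
      have hy1 : y = 1 := by omega
      rw [facB, dif_neg h, if_neg h1]
      constructor
      · exact Or.inl
      · rintro (hp | ⟨ha, hb, hc⟩)
        · exact hp
        · rw [hy1] at hc
          exact absurd (Int.eq_one_of_dvd_one (by omega) hc) (by omega)

-- the two main loops agree as soon as the two skip-conditions agree on every candidate
theorem loop_eq (xf primes : List Int) (n : Int)
    (hcond : ∀ i : Int, 2 ≤ i →
      (((PySem.Set.inter (PySem.Set.ofList xf) (PySem.Set.ofList (find_factor i))).isEmpty = false) ↔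
        ((primes.any fun p => PySem.Int.mod i p = 0) = true))) :
    ∀ i : Int, 2 ≤ i → frpA_loop xf (PySem.List.pyRange i n 1) = frpB_loop primes n i := by
  intro i
  induction i using frpB_loop.induct primes n with
  | case1 i hlt hskip =>
      intro hi
      rw [PySem.List.pyRange_one_cons hlt, frpB_loop, dif_pos hlt, if_pos hskip]
      show (if (PySem.Set.inter (PySem.Set.ofList xf) (PySem.Set.ofList (find_factor i))).isEmpty = false
            then frpA_loop xf (PySem.List.pyRange (i + 1) n 1) else some i) = some i
      rw [if_neg]
      intro hc
      have := (hcond i hi).mp hc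
      simp [this] at hskip
  | case2 i hlt hskip ih =>
      intro hi
      rw [PySem.List.pyRange_one_cons hlt, frpB_loop, dif_pos hlt, if_neg hskip]
      show (if (PySem.Set.inter (PySem.Set.ofList xf) (PySem.Set.ofList (find_factor i))).isEmpty = false
            then frpA_loop xf (PySem.List.pyRange (i + 1) n 1) else some i) =
           frpB_loop primes n (i + 1)
      rw [if_pos, ih (by omega)]
      by_contra hc
      have hb : (primes.any fun p => PySem.Int.mod i p = 0) = false := by
        cases hB : (primes.any fun p => PySem.Int.mod i p = 0)
        · rfl
        · exact absurd ((hcond i hi).mpr hB) hc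
      exact hskip hb
  | case3 i hge =>
      intro hi
      rw [PySem.List.pyRange_one_eq_nil (by omega), frpB_loop, dif_neg hge]
      rfl

theorem inter_nonempty_iff (s t : List Int) :
    ((PySem.Set.inter (PySem.Set.ofList s) (PySem.Set.ofList t)).isEmpty = false) ↔
      ∃ a : Int, a ∈ s ∧ a ∈ t := by
  rw [List.isEmpty_eq_false_iff_exists_mem]
  constructor
  · rintro ⟨a, ha⟩
    have := (PySem.Set.mem_inter _ _ _).mp ha
    exact ⟨a, (PySem.Set.mem_ofList _ _).mp this.1, (PySem.Set.mem_ofList _ _).mp this.2⟩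
  · rintro ⟨a, h1, h2⟩
    exact ⟨a, (PySem.Set.mem_inter _ _ _).mpr ⟨(PySem.Set.mem_ofList _ _).mpr h1, (PySem.Set.mem_ofList _ _).mpr h2⟩⟩

theorem cond_equiv (x i : Int) (hi : 2 ≤ i) :
    ((PySem.Set.inter (PySem.Set.ofList (find_factor x)) (PySem.Set.ofList (find_factor i))).isEmpty = false) ↔
      (((facB x 2 []).any fun p => PySem.Int.mod i p = 0) = true) := by
  rw [inter_nonempty_iff, List.any_eq_true]
  simp only [decide_eq_true_eq]
  by_cases hx : 2 ≤ x
  · have hchar := facB_char x 2 [] (le_refl 2) (by omega) (fun e he1 he2 => absurd he2 (by omega))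
    constructor
    · rintro ⟨a, ha1, ha2⟩
      obtain ⟨ha3, -, ha4⟩ := (mem_find_factor x a).mp ha1
      obtain ⟨-, -, ha5⟩ := (mem_find_factor i a).mp ha2
      -- pass to a prime factor of the common divisor a
      set q := a.natAbs.minFac with hq
      have hqp : q.Prime := Nat.minFac_prime (by omega)
      have hqd : (q : Int) ∣ a := by
        have : (q : Int) ∣ (a.natAbs : Int) := Int.natCast_dvd_natCast.mpr (Nat.minFac_dvd _)
        rwa [Int.natAbs_of_nonneg (by omega)] at this
      refine ⟨q, ?_, (PySem.Int.mod_eq_zero_iff_dvd i q).mpr (hqd.trans ha5)⟩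
      rw [hchar]
      exact Or.inr ⟨by exact_mod_cast hqp.two_le, Nat.prime_iff_prime_int.mp hqp, hqd.trans ha4⟩
    · rintro ⟨p, hp1, hp2⟩
      rw [hchar] at hp1
      rcases hp1 with hp1 | ⟨h1, h2, h3⟩
      · simp at hp1
      · have hpi : p ∣ i := (PySem.Int.mod_eq_zero_iff_dvd i p).mp hp2
        refine ⟨p, ?_, ?_⟩
        · exact (mem_find_factor x p).mpr ⟨h1, Int.le_of_dvd (by omega) h3, h3⟩
        · exact (mem_find_factor i p).mpr ⟨h1, Int.le_of_dvd (by omega) hpi, hpi⟩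
  · -- x ≤ 1: A's divisor list and B's prime table are both empty
    have hff : find_factor x = [] := by
      rcases List.eq_nil_or_concat (find_factor x) with h | ⟨l, a, h⟩
      · exact h
      · exfalso
        have : a ∈ find_factor x := by rw [h]; simp
        obtain ⟨h1, h2, -⟩ := (mem_find_factor x a).mp this
        omega
    have hfb : facB x 2 [] = [] := by
      rw [facB, dif_neg (by rintro ⟨-, h4⟩; omega), if_neg (by omega)]
    rw [hff, hfb]
    simp
  
-- ===== VERDICT (by name: the statement is the Claim_ definition above) =====
theorem find_relative_prime_spec : Claim_equal_find_relative_prime := by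
  intro n x _
  unfold Spec_find_relative_prime find_relative_prime find_relative_prime_alt
  exact loop_eq (find_factor x) (facB x 2 []) n (fun i hi => cond_equiv x i hi) 2 (by omega)
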